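-- pv_equiv track=rewrite | github.com/agluszak/imperialism-decomp | new_scripts/build_tabsenu_schema_loader_bindings.py | arg_domain_hint
-- ===== SOURCE A (Python) =====
-- def arg_domain_hint(args: list[str]) -> str:
--     if not args:
--         return "none"
--     if all(a.isdigit() for a in args):
--         return "numeric"
--     if any(a.isdigit() for a in args):
--         return "mixed"
--     return "symbolic"
-- ===== SOURCE B (Python) =====
-- def arg_domain_hint(args: list[str]) -> str:
--     # Classify each element independently, then merge with a lattice join:
--     # none is the identity, equal kinds keep their kind, unequal kinds give "mixed".
--     state = "none"
--     for a in args: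
--         kind = "numeric" if a.isdigit() else "symbolic"
--         if state == "none":
--             state = kind
--         elif state != kind:
--             state = "mixed"
--     return state
-- ===== Notes on version B (the rewrite author's own statement) =====
-- stated objective: alternative
-- what changed: Instead of whole-list all()/any() tests, B classifies each element as numeric/symbolic and folds the classifications through a lattice join (none = identity, equal kinds preserved, unequal kinds collapse to mixed) in a single pass with no empty-list special case.
import Mathlib
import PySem

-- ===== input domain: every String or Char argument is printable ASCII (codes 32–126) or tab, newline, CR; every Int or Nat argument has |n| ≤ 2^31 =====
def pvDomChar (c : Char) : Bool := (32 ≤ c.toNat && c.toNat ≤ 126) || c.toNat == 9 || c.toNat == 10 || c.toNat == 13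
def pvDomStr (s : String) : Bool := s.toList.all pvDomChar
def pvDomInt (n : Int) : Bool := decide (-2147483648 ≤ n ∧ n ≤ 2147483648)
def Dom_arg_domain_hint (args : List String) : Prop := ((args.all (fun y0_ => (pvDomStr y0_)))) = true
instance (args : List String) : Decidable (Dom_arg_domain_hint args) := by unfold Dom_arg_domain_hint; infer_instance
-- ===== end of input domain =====

-- B replaces A's all()/any() whole-list tests by classifying each element and folding with a lattice join (none = identity, equal kinds kept, unequal → "mixed"); alternative decomposition, same cost.


-- ===== PORT A =====
def arg_domain_hint (args : List String) : String :=
  if args = [] then "none"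
  else if args.all (fun a => PySem.Str.strIsdigit a) then "numeric"
  else if args.any (fun a => PySem.Str.strIsdigit a) then "mixed"
  else "symbolic"

-- ===== PORT B =====
def adhJoin (state : String) (a : String) : String :=
  let kind := if PySem.Str.strIsdigit a then "numeric" else "symbolic"
  if state = "none" then kind
  else if state ≠ kind then "mixed"
  else state

def arg_domain_hint_alt (args : List String) : String :=
  args.foldl adhJoin "none"

-- ===== PRECONDITION & SPEC =====
def Spec_arg_domain_hint (args : List String) (out : String) : Prop := out = arg_domain_hint_alt args
instance (args : List String) (out : String) : Decidable (Spec_arg_domain_hint args out) := by unfold Spec_arg_domain_hint; infer_instance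

-- ===== CLAIM =====
def Claim_equal_arg_domain_hint : Prop := ∀ (args : List String), Dom_arg_domain_hint args → Spec_arg_domain_hint args (arg_domain_hint args)

-- ===== LEMMAS AND PROOFS =====
theorem foldl_join_mixed (t : List String) : t.foldl adhJoin "mixed" = "mixed" := by
  induction t with
  | nil => rfl
  | cons b t ih =>
    by_cases h : PySem.Chars.strIsdigit b.toList = true <;> simpa [adhJoin, h] using ih

theorem foldl_join_numeric (t : List String) :
    t.foldl adhJoin "numeric"
      = if t.all (fun a => PySem.Str.strIsdigit a) then "numeric" else "mixed" := by
  induction t with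
  | nil => simp
  | cons a t ih =>
    by_cases h : PySem.Chars.strIsdigit a.toList = true
    · simpa [adhJoin, h] using ih
    · simp [adhJoin, h, foldl_join_mixed]

theorem foldl_join_symbolic (t : List String) :
    t.foldl adhJoin "symbolic"
      = if t.any (fun a => PySem.Str.strIsdigit a) then "mixed" else "symbolic" := by
  induction t with
  | nil => simp
  | cons a t ih =>
    by_cases h : PySem.Chars.strIsdigit a.toList = true
    · simp [adhJoin, h, foldl_join_mixed]
    · simpa [adhJoin, h] using ih

-- ===== VERDICT =====
theorem arg_domain_hint_spec : Claim_equal_arg_domain_hint := by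
  intro args _
  unfold Spec_arg_domain_hint arg_domain_hint arg_domain_hint_alt
  cases args with
  | nil => rfl
  | cons a t =>
    rw [List.foldl_cons]
    by_cases h : PySem.Chars.strIsdigit a.toList = true
    · have hj : adhJoin "none" a = "numeric" := by simp [adhJoin, h]
      rw [hj, foldl_join_numeric]
      by_cases hall : ∀ x ∈ t, PySem.Chars.strIsdigit x.toList = true
      · simp [h]
      · simp [h, hall]
    · have hj : adhJoin "none" a = "symbolic" := by simp [adhJoin, h]
      rw [hj, foldl_join_symbolic]
      by_cases hany : ∃ x ∈ t, PySem.Chars.strIsdigit x.toList = true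
      · simp [h, hany]
      · simp [h, hany]
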